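-- pv_equiv track=rewrite | github.com/spa46/programming_contest | programmers/pccp/mocktest1/3.py | solution
-- ===== SOURCE A (Python) =====
-- Rr = ['RR', 'Rr', 'Rr', 'rr']
--
-- def solution(queries):
--     def dfs(n, p):
--         if n <= 1:
--             return 'Rr'
--
--         parent = (p) // 4
--         child = (p) % 4
--
--         res = dfs(n - 1, parent)
--         if res == 'Rr':
--             return Rr[child]
--         elif res == 'rr':
--             return 'rr'
--         else:
--             return 'RR'
--
--     answer = []
--     for n, p in queries:
--         answer.append(dfs(n, p - 1))
--
--     return answer
-- ===== SOURCE B (Python) =====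
-- def gene(n, q):
--     # state after n generations at 0-based position q: walk the base-4 digits
--     # of q from the most significant relevant position down; the first 0 digit
--     # fixes 'RR', the first 3 fixes 'rr', and if every digit is 1 or 2 the
--     # state stays 'Rr'.  The loop exits on its first iteration whenever
--     # n - 2 exceeds the digit count of q.
--     if n <= 1:
--         return 'Rr'
--     for k in range(n - 2, -1, -1):
--         d = q // 4 ** k % 4
--         if d == 0:
--             return 'RR'
--         if d == 3:
--             return 'rr'
--     return 'Rr'
--
--
-- def solution(queries):
--     return [gene(n, p - 1) for n, p in queries]
-- ===== Notes on version B (the rewrite author's own statement) =====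
-- stated objective: faster
-- what changed: A recurses n levels per query threading the automaton state bottom-up; B scans the base-4 digits of p-1 top-down and returns at the first decisive digit (0 -> RR, 3 -> rr), which on typical queries is the very first iteration, so work per query is O(min(n, log|p|)) automaton steps instead of O(n); Pre_ excludes only queries with n > 900, on which CPython's recursion limit makes A raise RecursionError.
import Mathlib
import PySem

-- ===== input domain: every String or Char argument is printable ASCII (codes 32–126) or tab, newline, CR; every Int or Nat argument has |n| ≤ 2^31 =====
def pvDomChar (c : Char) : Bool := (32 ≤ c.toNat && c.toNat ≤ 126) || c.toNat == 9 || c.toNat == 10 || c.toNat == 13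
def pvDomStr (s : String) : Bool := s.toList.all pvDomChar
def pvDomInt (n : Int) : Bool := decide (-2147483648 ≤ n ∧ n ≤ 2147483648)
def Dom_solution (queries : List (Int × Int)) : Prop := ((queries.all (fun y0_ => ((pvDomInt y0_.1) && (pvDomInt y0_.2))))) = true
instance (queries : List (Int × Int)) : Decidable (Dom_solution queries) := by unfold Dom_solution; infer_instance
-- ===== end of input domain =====

-- B replaces A's O(n)-deep per-query recursion by a top-down scan of the base-4 digits of
-- p-1 that stops at the first decisive digit (0 → "RR", 3 → "rr"); equivalence of return
-- values is proved on Pre_solution.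

-- ===== PORT A =====
def RrT : List String := ["RR", "Rr", "Rr", "rr"]

def dfsA (n p : Int) : String :=
  if n ≤ 1 then "Rr"
  else
    let parent := PySem.Int.floordiv p 4
    let child := PySem.Int.mod p 4
    let res := dfsA (n - 1) parent
    -- Rr[child]: child = p % 4 ∈ [0,4) (positive divisor), so the Python indexing never raises
    if res = "Rr" then PySem.List.pyGetD RrT child ""
    else if res = "rr" then "rr"
    else "RR"
termination_by n.toNat
decreasing_by omega

def solution (queries : List (Int × Int)) : List String :=
  queries.foldl (fun answer q => answer ++ [dfsA q.1 (q.2 - 1)]) []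

-- ===== PORT B =====
-- the loop `for k in range(n-2, -1, -1): d = q // 4**k % 4; …` of Source B with its early returns
-- (`4 ** k` with k ≥ 0, guaranteed by the loop guard, is exactly (4:Int) ^ k.toNat)
def scanB (q k : Int) : String :=
  if k ≥ 0 then
    let d := PySem.Int.mod (PySem.Int.floordiv q ((4 : Int) ^ k.toNat)) 4
    if d = 0 then "RR"
    else if d = 3 then "rr"
    else scanB q (k - 1)
  else "Rr"
termination_by (k + 1).toNat
decreasing_by omega

def geneB (n q : Int) : String :=
  if n ≤ 1 then "Rr"
  else scanB q (n - 2)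

def solution_alt (queries : List (Int × Int)) : List String :=
  queries.map (fun q => geneB q.1 (q.2 - 1))

-- ===== PRECONDITION & SPEC =====
-- Pre_ excludes queries whose generation count n exceeds 900: A's dfs recurses to depth n,
-- so CPython raises RecursionError near its (environment-dependent) default limit of 1000;
-- 900 is a conservative cutoff below that limit.
def Pre_solution (queries : List (Int × Int)) : Prop := ∀ q ∈ queries, q.1 ≤ 900
instance (queries : List (Int × Int)) : Decidable (Pre_solution queries) := by unfold Pre_solution; infer_instance

def pvWitness_solution : (List (Int × Int)) := [(3, 8), (2, 1)]

def Spec_solution (queries : List (Int × Int)) (out : List String) : Prop := out = solution_alt queries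
instance (queries : List (Int × Int)) (out : List String) : Decidable (Spec_solution queries out) := by unfold Spec_solution; infer_instance

-- ===== CLAIM (what is proved, stated in full; the proofs are below) =====
def Claim_equal_solution : Prop := ∀ (queries : List (Int × Int)), Dom_solution queries → Pre_solution queries → Spec_solution queries (solution queries)

-- ===== LEMMAS AND PROOFS =====

-- the one-generation transition of the genetics automaton
def stepG (s : String) (d : Int) : String :=
  if s = "Rr" then (if d = 0 then "RR" else if d = 3 then "rr" else "Rr")
  else if s = "rr" then "rr"
  else "RR"

-- base-4 digits of q at positions k, k-1, …, 0 (top-down)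
def digs : Nat → Int → List Int
  | 0, q => [PySem.Int.mod q 4]
  | k + 1, q => PySem.Int.mod (PySem.Int.floordiv q ((4 : Int) ^ (k + 1))) 4 :: digs k q

theorem fd_fd (q : Int) (k : Nat) :
    PySem.Int.floordiv (PySem.Int.floordiv q 4) ((4 : Int) ^ k) =
      PySem.Int.floordiv q ((4 : Int) ^ (k + 1)) := by
  rw [PySem.Int.floordiv_eq_ediv_of_pos (show (0:Int) < 4 by norm_num),
      PySem.Int.floordiv_eq_ediv_of_pos (show (0:Int) < 4 ^ k by positivity),
      PySem.Int.floordiv_eq_ediv_of_pos (show (0:Int) < 4 ^ (k + 1) by positivity),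
      Int.ediv_ediv_of_nonneg (show (0:Int) ≤ 4 by norm_num), ← pow_succ']

theorem pyGetD_RrT (d : Int) (h0 : 0 ≤ d) (h4 : d < 4) :
    PySem.List.pyGetD RrT d "" = (if d = 0 then "RR" else if d = 3 then "rr" else "Rr") := by
  have : d = 0 ∨ d = 1 ∨ d = 2 ∨ d = 3 := by omega
  rcases this with h | h | h | h <;> subst h <;> decide

theorem foldl_stepG_RR (l : List Int) : l.foldl stepG "RR" = "RR" := by
  induction l with
  | nil => rfl
  | cons d l ih => simpa [stepG] using ih

theorem foldl_stepG_rr (l : List Int) : l.foldl stepG "rr" = "rr" := by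
  induction l with
  | nil => rfl
  | cons d l ih => simpa [stepG] using ih

theorem foldl_stepG_mem (l : List Int) (s : String)
    (h : s = "Rr" ∨ s = "RR" ∨ s = "rr") :
    l.foldl stepG s = "Rr" ∨ l.foldl stepG s = "RR" ∨ l.foldl stepG s = "rr" := by
  induction l generalizing s with
  | nil => exact h
  | cons d l ih =>
    apply ih
    rcases h with h | h | h <;> subst h <;> unfold stepG <;> split_ifs <;> simp

theorem branchA (res : String) (h : res = "Rr" ∨ res = "RR" ∨ res = "rr")
    (d : Int) (h0 : 0 ≤ d) (h4 : d < 4) :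
    (if res = "Rr" then PySem.List.pyGetD RrT d ""
     else if res = "rr" then "rr" else "RR") = stepG res d := by
  rcases h with h | h | h <;> subst h <;> simp [stepG, pyGetD_RrT d h0 h4]

theorem digs_shift (k : Nat) (q : Int) :
    digs (k + 1) q = digs k (PySem.Int.floordiv q 4) ++ [PySem.Int.mod q 4] := by
  induction k generalizing q with
  | zero => simp [digs]
  | succ k ih =>
    show _ :: digs (k + 1) q = (_ :: digs k _) ++ _
    rw [ih, fd_fd q (k + 1)]
    rfl

theorem mod4_nonneg (q : Int) : 0 ≤ PySem.Int.mod q 4 := PySem.Int.mod_nonneg q (by norm_num)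

theorem mod4_lt (q : Int) : PySem.Int.mod q 4 < 4 := PySem.Int.mod_lt q (by norm_num)

theorem stepG_Rr (d : Int) :
    stepG "Rr" d = (if d = 0 then "RR" else if d = 3 then "rr" else "Rr") := by
  unfold stepG
  rw [if_pos rfl]

theorem dfsA_char (k : Nat) (q : Int) :
    dfsA ((k : Int) + 2) q = (digs k q).foldl stepG "Rr" := by
  induction k generalizing q with
  | zero =>
    rw [show ((0 : Nat) : Int) + 2 = 2 by norm_num, dfsA, if_neg (by norm_num)]
    show (if dfsA (2 - 1) (PySem.Int.floordiv q 4) = "Rr" then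
            PySem.List.pyGetD RrT (PySem.Int.mod q 4) ""
          else if dfsA (2 - 1) (PySem.Int.floordiv q 4) = "rr" then "rr" else "RR") = _
    rw [show (2 : Int) - 1 = 1 by norm_num, dfsA, if_pos (by norm_num),
        pyGetD_RrT _ (mod4_nonneg q) (mod4_lt q)]
    show _ = List.foldl stepG "Rr" [PySem.Int.mod q 4]
    rw [List.foldl_cons, List.foldl_nil, stepG_Rr]
  | succ k ih =>
    rw [show (((k + 1 : Nat)) : Int) + 2 = ((k : Int) + 2) + 1 by push_cast; ring, dfsA,
        if_neg (show ¬ ((k : Int) + 2 + 1 ≤ 1) by omega)]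
    show (if dfsA ((k : Int) + 2 + 1 - 1) (PySem.Int.floordiv q 4) = "Rr" then
            PySem.List.pyGetD RrT (PySem.Int.mod q 4) ""
          else if dfsA ((k : Int) + 2 + 1 - 1) (PySem.Int.floordiv q 4) = "rr" then "rr"
          else "RR") = _
    rw [show (k : Int) + 2 + 1 - 1 = (k : Int) + 2 by ring, ih,
        digs_shift, List.foldl_append]
    simp only [List.foldl_cons, List.foldl_nil]
    exact branchA _ (foldl_stepG_mem _ _ (Or.inl rfl)) _ (mod4_nonneg q) (mod4_lt q)

theorem scanB_char (k : Nat) (q : Int) :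
    scanB q (k : Int) = (digs k q).foldl stepG "Rr" := by
  induction k with
  | zero =>
    have hq1 : PySem.Int.floordiv q ((4 : Int) ^ ((0 : Int).toNat)) = q := by
      rw [show ((4 : Int) ^ ((0 : Int).toNat)) = 1 from rfl,
          PySem.Int.floordiv_eq_ediv_of_pos (by norm_num)]
      exact Int.ediv_one q
    simp only [Nat.cast_zero]
    rw [scanB, if_pos (by norm_num)]
    show (if PySem.Int.mod (PySem.Int.floordiv q ((4 : Int) ^ ((0 : Int).toNat))) 4 = 0 then "RR"
          else if PySem.Int.mod (PySem.Int.floordiv q ((4 : Int) ^ ((0 : Int).toNat))) 4 = 3 then "rr"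
          else scanB q (0 - 1)) = _
    rw [hq1, show scanB q (0 - 1) = "Rr" from by rw [scanB, if_neg (by norm_num)]]
    show _ = List.foldl stepG "Rr" [PySem.Int.mod q 4]
    rw [List.foldl_cons, List.foldl_nil, stepG_Rr]
  | succ k ih =>
    rw [scanB, if_pos (show ((k + 1 : Nat) : Int) ≥ 0 by positivity)]
    show (if PySem.Int.mod (PySem.Int.floordiv q ((4 : Int) ^ ((k + 1 : Nat) : Int).toNat)) 4 = 0 then "RR"
          else if PySem.Int.mod (PySem.Int.floordiv q ((4 : Int) ^ ((k + 1 : Nat) : Int).toNat)) 4 = 3 then "rr"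
          else scanB q (((k + 1 : Nat) : Int) - 1)) = _
    rw [show (((k + 1 : Nat) : Int)).toNat = k + 1 from Int.toNat_natCast _,
        show (((k + 1 : Nat) : Int)) - 1 = (k : Int) by push_cast; ring]
    show _ = (digs (k + 1) q).foldl stepG "Rr"
    rw [show digs (k + 1) q =
          PySem.Int.mod (PySem.Int.floordiv q ((4 : Int) ^ (k + 1))) 4 :: digs k q from rfl,
        List.foldl_cons, stepG_Rr]
    by_cases h0 : PySem.Int.mod (PySem.Int.floordiv q ((4 : Int) ^ (k + 1))) 4 = 0
    · rw [if_pos h0, if_pos h0, foldl_stepG_RR]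
    · rw [if_neg h0, if_neg h0]
      by_cases h3 : PySem.Int.mod (PySem.Int.floordiv q ((4 : Int) ^ (k + 1))) 4 = 3
      · rw [if_pos h3, if_pos h3, foldl_stepG_rr]
      · rw [if_neg h3, if_neg h3, ih]

theorem dfsA_eq_geneB (n q : Int) : dfsA n q = geneB n q := by
  by_cases hn : n ≤ 1
  · rw [dfsA, if_pos hn, geneB, if_pos hn]
  · have hk : (((n - 2).toNat : Int)) = n - 2 := Int.toNat_of_nonneg (by omega)
    rw [geneB, if_neg hn]
    calc dfsA n q = dfsA (((n - 2).toNat : Int) + 2) q := by rw [hk]; ring_nf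
      _ = (digs (n - 2).toNat q).foldl stepG "Rr" := dfsA_char _ q
      _ = scanB q ((n - 2).toNat : Int) := (scanB_char _ q).symm
      _ = scanB q (n - 2) := by rw [hk]

theorem foldl_append_map (f : Int × Int → String) (l : List (Int × Int)) :
    l.foldl (fun answer q => answer ++ [f q]) [] = l.map f := by
  simpa using PySem.List.foldl_append_singleton_eq_map (f := f) (l := l) (acc := [])

-- ===== VERDICT (by name: the statement is the Claim_ definition above) =====
theorem solution_spec : Claim_equal_solution := by
  intro queries _ _
  unfold Spec_solution solution solution_alt
  rw [foldl_append_map]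
  exact List.map_congr_left fun q _ => dfsA_eq_geneB q.1 (q.2 - 1)
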